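-- pv_equiv track=rewrite | github.com/vijayaragavan-ARR/test | app.py | classify_sentence_type
-- ===== SOURCE A (Python) =====
-- auxiliary_verbs = {'be', 'am', 'is', 'are', 'was', 'were', 'been', 'being', 'has', 'had', 'do', 'does'}
--
-- negative_words = {'not', 'no', "don't", "doesn't", "didn't", "won't", "can't", "couldn't", "isn't", "aren't", "wasn't", "weren't"}
--
-- questionary_words = {'where', 'who', 'what', 'when', 'how', 'why'}
--
-- def classify_sentence_type(tagged_words):
--     first_word_tag = tagged_words[0][1]
--     first_word = tagged_words[0][0].casefold()
--
--     if first_word_tag == 'MD' or first_word.casefold() in auxiliary_verbs or any(word[0].casefold() in questionary_words for word in tagged_words):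
--         return 'question'
--
--     elif first_word_tag.startswith('V') and first_word != 'be' and first_word_tag != 'MD':
--         return 'imperative'
--
--     elif any(word[0].casefold() in negative_words for word in tagged_words):
--         return 'negative' #completed
--
--     else:
--         return 'simple'  #completed
-- ===== SOURCE B (Python) =====
-- auxiliary_verbs = {'be', 'am', 'is', 'are', 'was', 'were', 'been', 'being', 'has', 'had', 'do', 'does'}
--
-- negative_words = {'not', 'no', "don't", "doesn't", "didn't", "won't", "can't", "couldn't", "isn't", "aren't", "wasn't", "weren't"}
--
-- questionary_words = {'where', 'who', 'what', 'when', 'how', 'why'}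
--
-- def classify_sentence_type(tagged_words):
--     # Rank formulation: question=3 > imperative=2 > negative=1 > simple=0.
--     # The answer is the table entry at the maximum rank of any piece of evidence.
--     first_word_tag = tagged_words[0][1]
--     first_word = tagged_words[0][0].casefold()
--
--     if first_word_tag == 'MD' or first_word in auxiliary_verbs:
--         rank = 3
--     elif first_word_tag.startswith('V') and first_word != 'be':
--         rank = 2
--     else:
--         rank = 0
--
--     for word in tagged_words:
--         w = word[0].casefold()
--         if w in questionary_words:
--             rank = max(rank, 3)
--         elif w in negative_words:
--             rank = max(rank, 1)
--
--     return ('simple', 'negative', 'imperative', 'question')[rank]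
-- ===== Notes on version B (the rewrite author's own statement) =====
-- stated objective: alternative
-- what changed: Replaced A's early-return priority cascade with embedded lazy any() scans by an arithmetical max-of-ranks formulation: head evidence and each word's evidence are mapped to a numeric priority (question=3, imperative=2, negative=1, simple=0), one loop keeps the running maximum, and the answer is a table lookup at that rank.
import Mathlib
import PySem

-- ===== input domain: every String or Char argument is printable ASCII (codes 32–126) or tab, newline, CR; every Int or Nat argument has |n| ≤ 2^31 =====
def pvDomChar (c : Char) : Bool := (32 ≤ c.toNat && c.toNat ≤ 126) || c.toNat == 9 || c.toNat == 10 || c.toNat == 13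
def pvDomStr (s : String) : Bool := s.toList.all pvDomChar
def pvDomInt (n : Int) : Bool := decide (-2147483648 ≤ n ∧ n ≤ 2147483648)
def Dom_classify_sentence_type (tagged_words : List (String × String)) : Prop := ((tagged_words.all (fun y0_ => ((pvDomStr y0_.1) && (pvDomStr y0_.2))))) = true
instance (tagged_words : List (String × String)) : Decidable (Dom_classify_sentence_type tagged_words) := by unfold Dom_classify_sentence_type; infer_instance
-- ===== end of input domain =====

-- B replaces A's early-return cascade with lazy any() scans by a max-of-priority-ranks
-- formulation (question=3 > imperative=2 > negative=1 > simple=0) with a table lookup at the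
-- maximal rank (alternative decomposition, same cost).  Python's str.casefold() is ported as
-- PySem.Str.lower: they agree on the ASCII domain Dom_ admits.

-- ===== PORT A =====
def pvAux : PySem.Set String := PySem.Set.ofList ["be", "am", "is", "are", "was", "were", "been", "being", "has", "had", "do", "does"]
def pvNeg : PySem.Set String := PySem.Set.ofList ["not", "no", "don't", "doesn't", "didn't", "won't", "can't", "couldn't", "isn't", "aren't", "wasn't", "weren't"]
def pvQue : PySem.Set String := PySem.Set.ofList ["where", "who", "what", "when", "how", "why"]

def classify_sentence_type (tagged_words : List (String × String)) : String :=
  -- tagged_words[0] raises IndexError on []; Pre_ excludes that, pyGetD's default is never read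
  let first_word_tag := (PySem.List.pyGetD tagged_words 0 ("", "")).2
  let first_word := PySem.Str.lower (PySem.List.pyGetD tagged_words 0 ("", "")).1
  if first_word_tag == "MD" || PySem.Set.contains pvAux (PySem.Str.lower first_word)
      || tagged_words.any (fun word => PySem.Set.contains pvQue (PySem.Str.lower word.1)) then
    "question"
  else if PySem.Str.startswith first_word_tag "V" && first_word != "be" && first_word_tag != "MD" then
    "imperative"
  else if tagged_words.any (fun word => PySem.Set.contains pvNeg (PySem.Str.lower word.1)) then
    "negative"
  else
    "simple"

-- ===== PORT B =====
def classify_sentence_type_alt (tagged_words : List (String × String)) : String :=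
  let first_word_tag := (PySem.List.pyGetD tagged_words 0 ("", "")).2
  let first_word := PySem.Str.lower (PySem.List.pyGetD tagged_words 0 ("", "")).1
  let headRank : Nat :=
    if first_word_tag == "MD" || PySem.Set.contains pvAux first_word then 3
    else if PySem.Str.startswith first_word_tag "V" && first_word != "be" then 2
    else 0
  let rank := tagged_words.foldl
    (fun (r : Nat) word =>
      let w := PySem.Str.lower word.1
      if PySem.Set.contains pvQue w then max r 3
      else if PySem.Set.contains pvNeg w then max r 1
      else r) headRank
  PySem.List.pyGetD ["simple", "negative", "imperative", "question"] (rank : Int) ""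

-- ===== PRECONDITION & SPEC =====
-- Pre_ excludes only the empty list, on which A raises IndexError (tagged_words[0]).
def Pre_classify_sentence_type (tagged_words : List (String × String)) : Prop := tagged_words ≠ []
instance (tagged_words : List (String × String)) : Decidable (Pre_classify_sentence_type tagged_words) := by unfold Pre_classify_sentence_type; infer_instance
def pvWitness_classify_sentence_type : (List (String × String)) := [("go", "VB")]

def Spec_classify_sentence_type (tagged_words : List (String × String)) (out : String) : Prop := out = classify_sentence_type_alt tagged_words
instance (tagged_words : List (String × String)) (out : String) : Decidable (Spec_classify_sentence_type tagged_words out) := by unfold Spec_classify_sentence_type; infer_instance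

-- ===== CLAIM =====
def Claim_equal_classify_sentence_type : Prop := ∀ (tagged_words : List (String × String)), Dom_classify_sentence_type tagged_words → Pre_classify_sentence_type tagged_words → Spec_classify_sentence_type tagged_words (classify_sentence_type tagged_words)

-- ===== LEMMAS AND PROOFS =====

theorem pv_lowerChar_idem (c : Char) : PySem.Chars.lowerChar (PySem.Chars.lowerChar c) = PySem.Chars.lowerChar c := by
  unfold PySem.Chars.lowerChar
  by_cases h : PySem.Chars.isupper c = true
  · simp only [h, if_true]
    have hlow : PySem.Chars.isupper (Char.ofNat (c.toNat + 32)) = false := by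
      simp only [PySem.Chars.isupper, Bool.and_eq_true, decide_eq_true_eq] at h
      have ha : 65 ≤ c.toNat := by
        have := h.1; rw [Char.le_def, UInt32.le_iff_toNat_le] at this; exact this
      have hb : c.toNat ≤ 90 := by
        have := h.2; rw [Char.le_def, UInt32.le_iff_toNat_le] at this; exact this
      have hv : (Char.ofNat (c.toNat + 32)).toNat = c.toNat + 32 := by
        rw [Char.toNat_ofNat, if_pos (Or.inl (by omega))]
      simp only [PySem.Chars.isupper, Bool.and_eq_false_iff, decide_eq_false_iff_not]
      right
      rw [Char.le_def, UInt32.le_iff_toNat_le]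
      show ¬ (Char.ofNat (c.toNat + 32)).toNat ≤ ('Z').toNat
      have hz : ('Z').toNat = 90 := rfl
      rw [hv, hz]; omega
    simp [hlow]
  · simp [h]

theorem pv_lower_idem (s : String) : PySem.Str.lower (PySem.Str.lower s) = PySem.Str.lower s := by
  apply String.ext
  show (PySem.Str.lower (PySem.Str.lower s)).toList = (PySem.Str.lower s).toList
  simp only [PySem.Str.toList_lower, PySem.Chars.lower, List.map_map]
  exact List.map_congr_left (fun c _ => pv_lowerChar_idem c)

-- B's running maximum equals the max of the start rank and the strongest per-word evidence,
-- which is 3 iff some question word occurs, else 1 iff some negative word occurs, else 0.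
theorem pv_rank_fold (xs : List (String × String)) (r : Nat) :
    xs.foldl
      (fun (r : Nat) word =>
        let w := PySem.Str.lower word.1
        if PySem.Set.contains pvQue w then max r 3
        else if PySem.Set.contains pvNeg w then max r 1
        else r) r
    = max r (if xs.any (fun word => PySem.Set.contains pvQue (PySem.Str.lower word.1)) then 3
             else if xs.any (fun word => PySem.Set.contains pvNeg (PySem.Str.lower word.1)) then 1
             else 0) := by
  induction xs generalizing r with
  | nil => simp
  | cons x xs ih =>
    by_cases hq : PySem.Set.contains pvQue (PySem.Str.lower x.1) = true <;>
      by_cases hn : PySem.Set.contains pvNeg (PySem.Str.lower x.1) = true <;>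
        simp only [List.foldl_cons, List.any_cons, hq, hn, Bool.true_or, Bool.false_or,
                   if_true, Bool.false_eq_true, if_false, ih] <;>
        split_ifs <;> omega

-- ===== VERDICT =====
theorem classify_sentence_type_spec : Claim_equal_classify_sentence_type := by
  intro tw _ _
  show classify_sentence_type tw = classify_sentence_type_alt tw
  unfold classify_sentence_type classify_sentence_type_alt
  simp only [pv_rank_fold, pv_lower_idem, bne]
  -- the result depends on the input only through six booleans; the rest is a finite check
  generalize (PySem.List.pyGetD tw 0 ("", "")).2 = t
  generalize PySem.Str.lower (PySem.List.pyGetD tw 0 ("", "")).1 = f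
  generalize (tw.any fun word => PySem.Set.contains pvQue (PySem.Str.lower word.1)) = q
  generalize (tw.any fun word => PySem.Set.contains pvNeg (PySem.Str.lower word.1)) = n
  rcases (t == "MD").eq_false_or_eq_true with hm | hm <;>
    rcases (PySem.Set.contains pvAux f).eq_false_or_eq_true with ha | ha <;>
      rcases (PySem.Str.startswith t "V").eq_false_or_eq_true with hs | hs <;>
        rcases (f == "be").eq_false_or_eq_true with he | he <;>
          rcases q.eq_false_or_eq_true with hq | hq <;>
            rcases n.eq_false_or_eq_true with hn | hn <;>
              simp only [hm, ha, hs, he, hq, hn] <;> rfl
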